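-- pv_equiv track=rewrite | github.com/muyikun007/xiaoshuo | app.py | _build_chapter_range_context
-- ===== SOURCE A (Python) =====
-- def _build_chapter_range_context(full_text: str, existing: dict, a: int, b: int) -> str:
--     head = (full_text or "")[:5000].strip()
--     lines = []
--     start = max(1, a - 12)
--     end = b + 12
--     for k in range(start, end + 1):
--         if k in existing:
--             t = (existing[k].get("title") or "").strip()
--             s = (existing[k].get("summary") or "").strip()
--             if t or s:
--                 lines.append(f"第{k}章 {t}：{s}")
--     block = "\n".join(lines).strip()
--     if head and block:
--         return head + "\n\n【相关章节上下文】\n" + block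
--     if block:
--         return "【相关章节上下文】\n" + block
--     return head
-- ===== SOURCE B (Python) =====
-- def _line(existing, k):
--     t = (existing[k].get("title") or "").strip()
--     s = (existing[k].get("summary") or "").strip()
--     return f"第{k}章 {t}：{s}" if (t or s) else None
--
--
-- def _build_chapter_range_context(full_text: str, existing: dict, a: int, b: int) -> str:
--     head = (full_text or "")[:5000].strip()
--     start = max(1, a - 12)
--     end = b + 12
--     ks = sorted(k for k in existing if start <= k <= end)
--     block = "\n".join(ln for ln in map(lambda k: _line(existing, k), ks) if ln is not None).strip()
--     if head and block:
--         return head + "\n\n【相关章节上下文】\n" + block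
--     if block:
--         return "【相关章节上下文】\n" + block
--     return head
-- ===== Notes on version B (the rewrite author's own statement) =====
-- stated objective: idiomatic
-- what changed: B iterates over the keys actually present in `existing`, filters them to [start, end] and sorts them ascending, building lines via filter/map over that key list, instead of A's probing every integer of the padded span with a membership test and an accumulator loop.
import Mathlib
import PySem

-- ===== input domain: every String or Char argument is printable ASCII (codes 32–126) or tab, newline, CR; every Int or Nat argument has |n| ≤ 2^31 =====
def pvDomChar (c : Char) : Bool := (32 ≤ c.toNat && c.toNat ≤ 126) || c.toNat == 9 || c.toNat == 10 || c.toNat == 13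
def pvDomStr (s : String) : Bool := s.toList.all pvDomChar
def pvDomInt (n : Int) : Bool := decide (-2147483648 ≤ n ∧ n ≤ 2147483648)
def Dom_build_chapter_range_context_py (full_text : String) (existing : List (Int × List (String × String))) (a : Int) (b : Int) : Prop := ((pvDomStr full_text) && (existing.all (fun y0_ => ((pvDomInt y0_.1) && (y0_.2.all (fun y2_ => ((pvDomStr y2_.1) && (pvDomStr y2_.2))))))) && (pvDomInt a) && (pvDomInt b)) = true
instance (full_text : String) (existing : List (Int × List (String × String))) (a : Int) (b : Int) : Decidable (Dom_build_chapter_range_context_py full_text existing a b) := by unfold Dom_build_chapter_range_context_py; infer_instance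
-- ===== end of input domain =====

-- B is a more idiomatic re-implementation: instead of probing every integer in the padded span,
-- it scans the keys actually present, filters them to the span, sorts them and builds the lines.

-- ===== PORT A =====
-- the formatted line "第{k}章 {t}：{s}"
def pvLineA (k : Int) (t s : List Char) : List Char :=
  "第".toList ++ PySem.Int.toChars k ++ "章 ".toList ++ t ++ "：".toList ++ s

def build_chapter_range_context_py (full_text : String) (existing : List (Int × List (String × String))) (a : Int) (b : Int) : String :=
  let head := PySem.Chars.strip (PySem.List.slice full_text.toList none (some 5000))
  let start := max 1 (a - 12)
  let stop := b + 12
  let lines := (PySem.List.pyRange start (stop + 1)).foldl (fun lines k =>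
    match existing.lookup k with
    | some v =>
      let t := PySem.Chars.strip ((v.lookup "title").getD "").toList
      let s := PySem.Chars.strip ((v.lookup "summary").getD "").toList
      if t ≠ [] ∨ s ≠ [] then lines ++ [pvLineA k t s] else lines
    | none => lines) ([] : List (List Char))
  let block := PySem.Chars.strip (PySem.Chars.join ['\n'] lines)
  if head ≠ [] ∧ block ≠ [] then String.ofList (head ++ "\n\n【相关章节上下文】\n".toList ++ block)
  else if block ≠ [] then String.ofList ("【相关章节上下文】\n".toList ++ block)
  else String.ofList head

-- ===== PORT B =====
-- _line: the line for a present chapter key, or none when both fields strip to empty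
def pvLineOptB (existing : List (Int × List (String × String))) (k : Int) : Option (List Char) :=
  match existing.lookup k with
  | some v =>
    let t := PySem.Chars.strip ((v.lookup "title").getD "").toList
    let s := PySem.Chars.strip ((v.lookup "summary").getD "").toList
    if t ≠ [] ∨ s ≠ [] then
      some ("第".toList ++ PySem.Int.toChars k ++ "章 ".toList ++ t ++ "：".toList ++ s)
    else none
  | none => none

def build_chapter_range_context_py_alt (full_text : String) (existing : List (Int × List (String × String))) (a : Int) (b : Int) : String :=
  let head := PySem.Chars.strip (PySem.List.slice full_text.toList none (some 5000))
  let start := max 1 (a - 12)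
  let stop := b + 12
  let ks := PySem.List.sorted ((PySem.Set.ofList (existing.map Prod.fst)).filter
      (fun k => decide (start ≤ k) && decide (k ≤ stop))) (fun x => x)
  let block := PySem.Chars.strip (PySem.Chars.join ['\n'] (ks.filterMap (pvLineOptB existing)))
  if head ≠ [] ∧ block ≠ [] then String.ofList (head ++ "\n\n【相关章节上下文】\n".toList ++ block)
  else if block ≠ [] then String.ofList ("【相关章节上下文】\n".toList ++ block)
  else String.ofList head

-- ===== PRECONDITION & SPEC =====
def Spec_build_chapter_range_context_py (full_text : String) (existing : List (Int × List (String × String))) (a : Int) (b : Int) (out : String) : Prop := out = build_chapter_range_context_py_alt full_text existing a b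
instance (full_text : String) (existing : List (Int × List (String × String))) (a : Int) (b : Int) (out : String) : Decidable (Spec_build_chapter_range_context_py full_text existing a b out) := by unfold Spec_build_chapter_range_context_py; infer_instance

-- ===== CLAIM (what is proved, stated in full; the proofs are below) =====
def Claim_equal_build_chapter_range_context_py : Prop := ∀ (full_text : String) (existing : List (Int × List (String × String))) (a : Int) (b : Int), Dom_build_chapter_range_context_py full_text existing a b → Spec_build_chapter_range_context_py full_text existing a b (build_chapter_range_context_py full_text existing a b)

-- ===== LEMMAS AND PROOFS =====

-- A's accumulator loop is the filterMap of B's per-key line function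
lemma foldlA_eq_filterMap (existing : List (Int × List (String × String))) (l : List Int)
    (init : List (List Char)) :
    l.foldl (fun lines k =>
      match existing.lookup k with
      | some v =>
        let t := PySem.Chars.strip ((v.lookup "title").getD "").toList
        let s := PySem.Chars.strip ((v.lookup "summary").getD "").toList
        if t ≠ [] ∨ s ≠ [] then lines ++ [pvLineA k t s] else lines
      | none => lines) init = init ++ l.filterMap (pvLineOptB existing) := by
  induction l generalizing init with
  | nil => simp
  | cons k rest ih =>
    simp only [List.foldl_cons, List.filterMap_cons, ih]
    unfold pvLineOptB pvLineA
    cases h : existing.lookup k with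
    | none => simp
    | some v => simp only []; split <;> simp

-- filterMap ignores keys with no entry
lemma filterMap_eq_filterMap_filter {α β : Type} (F : α → Option β) (p : α → Bool)
    (h : ∀ x, p x = false → F x = none) (l : List α) :
    l.filterMap F = (l.filter p).filterMap F := by
  induction l with
  | nil => rfl
  | cons x xs ih =>
    by_cases hp : p x = true
    · simp [hp, List.filterMap_cons, ih]
    · have := h x (by simpa using hp)
      simp [hp, this, ih]

lemma lookup_isSome_iff {ν : Type} (a : Int) (l : List (Int × ν)) :
    (List.lookup a l).isSome = true ↔ a ∈ l.map Prod.fst := by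
  induction l with
  | nil => simp [List.lookup]
  | cons x xs ih =>
    rw [List.map_cons, List.mem_cons, ← ih]
    by_cases h : a = x.1
    · simp [List.lookup, h]
    · have hb : (a == x.1) = false := beq_false_of_ne h
      simp [List.lookup, hb, h]

lemma pyRange_one_pairwise (a b : Int) : (PySem.List.pyRange a b).Pairwise (· < ·) := by
  by_cases h : a < b
  · have : (b - a).toNat = (b - (a + 1)).toNat + 1 := by omega
    rw [PySem.List.pyRange_one_cons h]
    refine List.Pairwise.cons ?_ (pyRange_one_pairwise (a + 1) b)
    intro x hx
    have := PySem.List.mem_pyRange_one.mp hx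
    omega
  · have : PySem.List.pyRange a b = [] := by
      by_contra hne
      obtain ⟨x, hx⟩ := List.exists_mem_of_ne_nil _ hne
      have := PySem.List.mem_pyRange_one.mp hx
      omega
    simp [this]
termination_by (b - a).toNat
decreasing_by omega

-- the two iteration orders produce the same key list
lemma keylists_eq (existing : List (Int × List (String × String))) (start stop : Int) :
    PySem.List.sorted ((PySem.Set.ofList (existing.map Prod.fst)).filter
        (fun k => decide (start ≤ k) && decide (k ≤ stop))) (fun x => x)
      = (PySem.List.pyRange start (stop + 1)).filter
          (fun k => (existing.lookup k).isSome) := by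
  apply PySem.List.sorted_eq_of_perm_of_pairwise_lt
  · apply (List.perm_ext_iff_of_nodup ?_ ?_).mpr
    · intro k
      simp only [List.mem_filter, PySem.Set.mem_ofList, PySem.List.mem_pyRange_one,
        Bool.and_eq_true, decide_eq_true_eq, lookup_isSome_iff]
      constructor
      · intro h; exact ⟨h.2, h.1.1, by omega⟩
      · intro h; exact ⟨⟨h.2.1, by omega⟩, h.1⟩
    · exact List.Nodup.filter _ (pyRange_one_pairwise start (stop + 1)).nodup
    · exact List.Nodup.filter _ (PySem.Set.nodup_ofList _)
  · exact List.Pairwise.filter _ (pyRange_one_pairwise start (stop + 1))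

-- keys with no entry contribute nothing, so pre-filtering them away is harmless
lemma filterMap_lineOpt_filter (existing : List (Int × List (String × String))) (l : List Int) :
    (l.filter (fun k => (existing.lookup k).isSome)).filterMap (pvLineOptB existing)
      = l.filterMap (pvLineOptB existing) := by
  refine (filterMap_eq_filterMap_filter _ _ ?_ l).symm
  intro x hx
  unfold pvLineOptB
  cases h : existing.lookup x with
  | none => rfl
  | some v => rw [h] at hx; simp at hx

-- ===== VERDICT (by name: the statement is the Claim_ definition above) =====
theorem build_chapter_range_context_py_spec : Claim_equal_build_chapter_range_context_py := by
  intro full_text existing a b _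
  unfold Spec_build_chapter_range_context_py
  simp only [build_chapter_range_context_py, build_chapter_range_context_py_alt,
    foldlA_eq_filterMap, List.nil_append, keylists_eq, filterMap_lineOpt_filter]
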